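-- pv_equiv track=rewrite | github.com/seoul-ssafy-class-2-studyclub/GaYoung_SSAFY | test/11번가_2020/task1.py | solution
-- ===== SOURCE A (Python) =====
-- def solution(S):
--     S = S.replace('b', ' ').replace('c', ' ').replace('d', ' ').replace('e', ' ').replace('f', ' ').replace('g', ' ')\
--         .replace('h', ' ').replace('i', ' ').replace('j', ' ').replace('k', ' ').replace('l', ' ').replace('m', ' ').\
--         replace('n', ' ').replace('o', ' ').replace('p', ' ').replace('q', ' ').replace('r', ' ').replace('s', ' ').\
--         replace('t', ' ').replace('u', ' ').replace('v', ' ').replace('w', ' ').replace('x', ' ').replace('y', ' ').replace('z', ' ')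
--
--     S = S.split(' ')
--
--     cnt = 0
--     for i in range(len(S)):
--         if len(S[i]) > 2:
--             return -1
--
--         elif len(S[i]) == 2:
--             continue
--
--         elif len(S[i]) < 2:
--             cnt += 2-len(S[i])
--
--     return cnt
-- ===== SOURCE B (Python) =====
-- def solution(S):
--     seps = " bcdefghijklmnopqrstuvwxyz"
--     cnt = 0
--     run = 0
--     for ch in S:
--         if ch in seps:
--             if run > 2:
--                 return -1
--             cnt += max(0, 2 - run)
--             run = 0
--         else:
--             run += 1
--     if run > 2:
--         return -1
--     return cnt + max(0, 2 - run)
-- ===== Notes on version B (the rewrite author's own statement) =====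
-- stated objective: faster
-- what changed: Replaces A's pipeline of 25 whole-string replace passes followed by a split on spaces and a loop over the tokens with a single streaming pass over the original string that keeps a run-length counter for the current run of non-separator characters and flushes it at each separator and at the end.
import Mathlib
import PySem

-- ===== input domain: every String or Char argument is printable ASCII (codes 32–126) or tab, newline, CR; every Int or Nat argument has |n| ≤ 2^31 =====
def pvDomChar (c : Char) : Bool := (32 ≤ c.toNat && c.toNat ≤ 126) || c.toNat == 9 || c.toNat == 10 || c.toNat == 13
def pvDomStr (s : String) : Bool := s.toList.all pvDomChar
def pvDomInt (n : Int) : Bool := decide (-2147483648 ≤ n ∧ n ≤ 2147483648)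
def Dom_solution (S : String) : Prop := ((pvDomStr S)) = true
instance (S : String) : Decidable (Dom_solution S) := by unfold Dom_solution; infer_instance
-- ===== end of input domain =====

-- B replaces A's 25-fold replace / split / token-loop pipeline by a single streaming pass
-- over the original string with a run-length counter (measured faster in a timing run).


-- ===== PORT A =====
-- the 'for i in range(len(S))' loop with its early 'return -1'
def solutionLoopA : List String → Int → Int
  | [], cnt => cnt
  | t :: ts, cnt =>
    if 2 < PySem.Str.len t then -1
    else if PySem.Str.len t = 2 then solutionLoopA ts cnt
    else solutionLoopA ts (cnt + (2 - PySem.Str.len t))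

def solution (S : String) : Int :=
  let s1 := PySem.Str.replace S "b" " "
  let s2 := PySem.Str.replace s1 "c" " "
  let s3 := PySem.Str.replace s2 "d" " "
  let s4 := PySem.Str.replace s3 "e" " "
  let s5 := PySem.Str.replace s4 "f" " "
  let s6 := PySem.Str.replace s5 "g" " "
  let s7 := PySem.Str.replace s6 "h" " "
  let s8 := PySem.Str.replace s7 "i" " "
  let s9 := PySem.Str.replace s8 "j" " "
  let s10 := PySem.Str.replace s9 "k" " "
  let s11 := PySem.Str.replace s10 "l" " "
  let s12 := PySem.Str.replace s11 "m" " "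
  let s13 := PySem.Str.replace s12 "n" " "
  let s14 := PySem.Str.replace s13 "o" " "
  let s15 := PySem.Str.replace s14 "p" " "
  let s16 := PySem.Str.replace s15 "q" " "
  let s17 := PySem.Str.replace s16 "r" " "
  let s18 := PySem.Str.replace s17 "s" " "
  let s19 := PySem.Str.replace s18 "t" " "
  let s20 := PySem.Str.replace s19 "u" " "
  let s21 := PySem.Str.replace s20 "v" " "
  let s22 := PySem.Str.replace s21 "w" " "
  let s23 := PySem.Str.replace s22 "x" " "
  let s24 := PySem.Str.replace s23 "y" " "
  let s25 := PySem.Str.replace s24 "z" " "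
  -- S.split(' '): sep " " is nonempty, so split? is always 'some'; .getD [] only totalizes
  let parts := (PySem.Str.split? s25 " ").getD []
  solutionLoopA parts 0

-- ===== PORT B =====
-- one streaming pass: run = length of current run of non-separator chars
def solutionLoopB : List Char → Int → Int → Int
  | [], run, cnt => if 2 < run then -1 else cnt + max 0 (2 - run)
  | c :: cs, run, cnt =>
    if (" bcdefghijklmnopqrstuvwxyz".toList).contains c then
      if 2 < run then -1 else solutionLoopB cs 0 (cnt + max 0 (2 - run))
    else solutionLoopB cs (run + 1) cnt

def solution_alt (S : String) : Int := solutionLoopB S.toList 0 0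

-- ===== PRECONDITION & SPEC =====
def Spec_solution (S : String) (out : Int) : Prop := out = solution_alt S
instance (S : String) (out : Int) : Decidable (Spec_solution S out) := by unfold Spec_solution; infer_instance

-- ===== CLAIM (what is proved, stated in full; the proofs are below) =====
def Claim_equal_solution : Prop := ∀ (S : String), Dom_solution S → Spec_solution S (solution S)

-- ===== LEMMAS AND PROOFS =====

-- the separator characters: space plus the lowercase letters b..z
def sepChars : List Char :=
  [' ', 'b', 'c', 'd', 'e', 'f', 'g', 'h', 'i', 'j', 'k', 'l', 'm',
   'n', 'o', 'p', 'q', 'r', 's', 't', 'u', 'v', 'w', 'x', 'y', 'z']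

lemma sep_toList : (" bcdefghijklmnopqrstuvwxyz" : String).toList = sepChars := by decide

-- the combined effect of A's 25 replaces on one character
def mchar (c : Char) : Char := if c ∈ sepChars then ' ' else c

lemma replace_go_cons (o n c : Char) (t acc : List Char) (fuel : Nat) :
    PySem.Chars.replace.go [o] [n] (fuel+1) (c::t) acc =
      if o = c then PySem.Chars.replace.go [o] [n] fuel t (n :: acc)
      else PySem.Chars.replace.go [o] [n] fuel t (c :: acc) := by
  simp [PySem.Chars.replace.go, List.isPrefixOf]

lemma replace_go_eq (o n : Char) :
    ∀ (l acc : List Char) (fuel : Nat), l.length ≤ fuel →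
      PySem.Chars.replace.go [o] [n] fuel l acc
        = acc.reverse ++ l.map (fun c => if c = o then n else c)
  | [], acc, fuel, _ => by cases fuel <;> simp [PySem.Chars.replace.go]
  | c :: t, acc, 0, h => by simp at h
  | c :: t, acc, fuel+1, h => by
    rw [replace_go_cons]
    by_cases hoc : o = c
    · rw [if_pos hoc, replace_go_eq o n t (n :: acc) fuel (by simpa using h)]
      simp [hoc.symm]
    · rw [if_neg hoc, replace_go_eq o n t (c :: acc) fuel (by simpa using h)]
      have hco : ¬ (c = o) := fun h' => hoc h'.symm
      simp [hco]

lemma replace_single (s : List Char) (o n : Char) :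
    PySem.Chars.replace s [o] [n] = s.map (fun c => if c = o then n else c) := by
  rw [PySem.Chars.replace]
  simpa using replace_go_eq o n s [] s.length le_rfl

lemma splitOn_go_acc (sep : List Char) :
    ∀ (fuel : Nat) (l cur : List Char) (acc : List (List Char)),
      PySem.Chars.splitOn.go sep fuel l cur acc
        = acc.reverse ++ PySem.Chars.splitOn.go sep fuel l cur []
  | 0, l, cur, acc => by simp [PySem.Chars.splitOn.go]
  | fuel+1, [], cur, acc => by simp [PySem.Chars.splitOn.go]
  | fuel+1, c :: t, cur, acc => by
    simp only [PySem.Chars.splitOn.go]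
    by_cases hp : sep.isPrefixOf (c :: t)
    · rw [if_pos hp, if_pos hp,
        splitOn_go_acc sep fuel (List.drop sep.length (c::t)) [] (cur.reverse :: acc),
        splitOn_go_acc sep fuel (List.drop sep.length (c::t)) [] [cur.reverse]]
      simp
    · rw [if_neg hp, if_neg hp, splitOn_go_acc sep fuel t (c :: cur) acc]

lemma splitOn_go_nil (cur : List Char) (fuel : Nat) :
    PySem.Chars.splitOn.go [' '] fuel [] cur [] = [cur.reverse] := by
  cases fuel <;> simp [PySem.Chars.splitOn.go]

lemma splitOn_go_cons (c : Char) (t cur : List Char) (fuel : Nat) :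
    PySem.Chars.splitOn.go [' '] (fuel+1) (c::t) cur [] =
      if ' ' = c then PySem.Chars.splitOn.go [' '] fuel t [] [cur.reverse]
      else PySem.Chars.splitOn.go [' '] fuel t (c :: cur) [] := by
  simp [PySem.Chars.splitOn.go, List.isPrefixOf]

lemma loopA_nil (cnt : Int) : solutionLoopA [] cnt = cnt := rfl

lemma loopA_cons (t : String) (ts : List String) (cnt : Int) :
    solutionLoopA (t :: ts) cnt =
      if 2 < PySem.Str.len t then -1
      else if PySem.Str.len t = 2 then solutionLoopA ts cnt
      else solutionLoopA ts (cnt + (2 - PySem.Str.len t)) := rfl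

lemma loopB_cons (c : Char) (cs : List Char) (run cnt : Int) :
    solutionLoopB (c :: cs) run cnt =
      if c ∈ sepChars then
        if 2 < run then -1 else solutionLoopB cs 0 (cnt + max 0 (2 - run))
      else solutionLoopB cs (run + 1) cnt := by
  simp [solutionLoopB, sep_toList]

-- the heart of the proof: A's loop over the tokens of the mapped string equals
-- B's streaming loop, with 'cur' the pending partial token
lemma main_lemma : ∀ (t : List Char) (cur : List Char) (cnt : Int) (fuel : Nat),
    t.length + 1 ≤ fuel →
    solutionLoopA ((PySem.Chars.splitOn.go [' '] fuel (t.map mchar) cur []).map String.ofList) cnt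
      = solutionLoopB t (cur.length : Int) cnt
  | [], cur, cnt, fuel, _ => by
    rw [List.map_nil, splitOn_go_nil]
    simp only [List.map_cons, List.map_nil, loopA_cons, loopA_nil, solutionLoopB,
      PySem.Str.len_eq, String.toList_ofList, List.length_reverse]
    split_ifs <;> omega
  | c :: t, cur, cnt, 0, h => by simp at h
  | c :: t, cur, cnt, fuel+1, h => by
    have hf : t.length + 1 ≤ fuel := by simpa using h
    rw [List.map_cons, loopB_cons]
    by_cases hc : c ∈ sepChars
    · have hm : mchar c = ' ' := if_pos hc
      rw [hm, splitOn_go_cons, if_pos rfl,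
        splitOn_go_acc [' '] fuel (t.map mchar) [] [cur.reverse]]
      simp only [List.map_cons, List.reverse_cons, List.reverse_nil, List.nil_append,
        List.singleton_append, loopA_cons, PySem.Str.len_eq, String.toList_ofList,
        List.length_reverse, if_pos hc]
      by_cases h2 : 2 < (cur.length : Int)
      · rw [if_pos h2, if_pos h2]
      · rw [if_neg h2, if_neg h2]
        by_cases he : (cur.length : Int) = 2
        · rw [if_pos he, he]
          have : cnt + max 0 (2 - (2:Int)) = cnt := by omega
          rw [this]
          exact main_lemma t [] cnt fuel hf
        · rw [if_neg he]
          have : max 0 (2 - (cur.length : Int)) = 2 - (cur.length : Int) := by omega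
          rw [this]
          exact main_lemma t [] (cnt + (2 - (cur.length : Int))) fuel hf
    · have hm : mchar c = c := if_neg hc
      have hcs : ¬ (' ' = c) := fun h' => hc (h' ▸ (by decide : ' ' ∈ sepChars))
      rw [hm, splitOn_go_cons, if_neg hcs, if_neg hc,
        main_lemma t (c :: cur) cnt fuel hf]
      simp only [List.length_cons]
      push_cast
      ring_nf

-- partial effect of the first replaces: letters in ls have become spaces
def mUpTo (ls : List Char) (c : Char) : Char := if c ∈ ls then ' ' else c

lemma base_map (l : List Char) :
    l.map (fun c => if c = 'b' then ' ' else c) = l.map (mUpTo ['b']) :=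
  List.map_congr_left fun a _ => by simp [mUpTo]

lemma step_map (ls : List Char) (o : Char) (ho : ¬ (' ' = o)) (l : List Char) :
    (l.map (mUpTo ls)).map (fun c => if c = o then ' ' else c) = l.map (mUpTo (ls ++ [o])) := by
  rw [List.map_map]
  refine List.map_congr_left fun a _ => ?_
  simp only [Function.comp_apply, mUpTo, List.mem_append, List.mem_singleton]
  by_cases ha : a ∈ ls
  · simp [ha, ho]
  · by_cases hao : a = o
    · subst hao; simp [ha]
    · simp [ha, hao]

set_option maxHeartbeats 1000000 in
set_option maxRecDepth 8000 in
lemma last_map (l : List Char) :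
    l.map (mUpTo ['b', 'c', 'd', 'e', 'f', 'g', 'h', 'i', 'j', 'k', 'l', 'm',
      'n', 'o', 'p', 'q', 'r', 's', 't', 'u', 'v', 'w', 'x', 'y', 'z']) = l.map mchar := by
  refine List.map_congr_left fun a _ => ?_
  by_cases h : a ∈ sepChars
  · fin_cases h <;> decide
  · have hm : mchar a = a := if_neg h
    have h' : a ∉ ['b', 'c', 'd', 'e', 'f', 'g', 'h', 'i', 'j', 'k', 'l', 'm',
        'n', 'o', 'p', 'q', 'r', 's', 't', 'u', 'v', 'w', 'x', 'y', 'z'] :=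
      fun hmem => h (by simp only [sepChars, List.mem_cons] at hmem ⊢; tauto)
    rw [hm, mUpTo, if_neg h']

-- ===== VERDICT (by name: the statement is the Claim_ definition above) =====
set_option maxHeartbeats 2000000 in
set_option maxRecDepth 8000 in
theorem solution_spec : Claim_equal_solution := by
  intro S _
  unfold Spec_solution solution solution_alt
  simp only [PySem.Str.split?, PySem.Str.toList_replace]
  -- reduce the string literals and collapse the replace chain into one map
  rw [show (" " : String).toList = [' '] from rfl]
  simp only [show ("b" : String).toList = ['b'] from rfl,
    show ("c" : String).toList = ['c'] from rfl, show ("d" : String).toList = ['d'] from rfl,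
    show ("e" : String).toList = ['e'] from rfl, show ("f" : String).toList = ['f'] from rfl,
    show ("g" : String).toList = ['g'] from rfl, show ("h" : String).toList = ['h'] from rfl,
    show ("i" : String).toList = ['i'] from rfl, show ("j" : String).toList = ['j'] from rfl,
    show ("k" : String).toList = ['k'] from rfl, show ("l" : String).toList = ['l'] from rfl,
    show ("m" : String).toList = ['m'] from rfl, show ("n" : String).toList = ['n'] from rfl,
    show ("o" : String).toList = ['o'] from rfl, show ("p" : String).toList = ['p'] from rfl,
    show ("q" : String).toList = ['q'] from rfl, show ("r" : String).toList = ['r'] from rfl,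
    show ("s" : String).toList = ['s'] from rfl, show ("t" : String).toList = ['t'] from rfl,
    show ("u" : String).toList = ['u'] from rfl, show ("v" : String).toList = ['v'] from rfl,
    show ("w" : String).toList = ['w'] from rfl, show ("x" : String).toList = ['x'] from rfl,
    show ("y" : String).toList = ['y'] from rfl, show ("z" : String).toList = ['z'] from rfl,
    replace_single]
  rw [base_map S.toList]
  rw [step_map ['b'] 'c' (by decide) S.toList]
  simp only [List.cons_append, List.nil_append]
  rw [step_map ['b', 'c'] 'd' (by decide) S.toList]
  simp only [List.cons_append, List.nil_append]
  rw [step_map ['b', 'c', 'd'] 'e' (by decide) S.toList]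
  simp only [List.cons_append, List.nil_append]
  rw [step_map ['b', 'c', 'd', 'e'] 'f' (by decide) S.toList]
  simp only [List.cons_append, List.nil_append]
  rw [step_map ['b', 'c', 'd', 'e', 'f'] 'g' (by decide) S.toList]
  simp only [List.cons_append, List.nil_append]
  rw [step_map ['b', 'c', 'd', 'e', 'f', 'g'] 'h' (by decide) S.toList]
  simp only [List.cons_append, List.nil_append]
  rw [step_map ['b', 'c', 'd', 'e', 'f', 'g', 'h'] 'i' (by decide) S.toList]
  simp only [List.cons_append, List.nil_append]
  rw [step_map ['b', 'c', 'd', 'e', 'f', 'g', 'h', 'i'] 'j' (by decide) S.toList]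
  simp only [List.cons_append, List.nil_append]
  rw [step_map ['b', 'c', 'd', 'e', 'f', 'g', 'h', 'i', 'j'] 'k' (by decide) S.toList]
  simp only [List.cons_append, List.nil_append]
  rw [step_map ['b', 'c', 'd', 'e', 'f', 'g', 'h', 'i', 'j', 'k'] 'l' (by decide) S.toList]
  simp only [List.cons_append, List.nil_append]
  rw [step_map ['b', 'c', 'd', 'e', 'f', 'g', 'h', 'i', 'j', 'k', 'l'] 'm' (by decide) S.toList]
  simp only [List.cons_append, List.nil_append]
  rw [step_map ['b', 'c', 'd', 'e', 'f', 'g', 'h', 'i', 'j', 'k', 'l', 'm'] 'n' (by decide) S.toList]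
  simp only [List.cons_append, List.nil_append]
  rw [step_map ['b', 'c', 'd', 'e', 'f', 'g', 'h', 'i', 'j', 'k', 'l', 'm', 'n'] 'o' (by decide) S.toList]
  simp only [List.cons_append, List.nil_append]
  rw [step_map ['b', 'c', 'd', 'e', 'f', 'g', 'h', 'i', 'j', 'k', 'l', 'm', 'n', 'o'] 'p' (by decide) S.toList]
  simp only [List.cons_append, List.nil_append]
  rw [step_map ['b', 'c', 'd', 'e', 'f', 'g', 'h', 'i', 'j', 'k', 'l', 'm', 'n', 'o', 'p'] 'q' (by decide) S.toList]
  simp only [List.cons_append, List.nil_append]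
  rw [step_map ['b', 'c', 'd', 'e', 'f', 'g', 'h', 'i', 'j', 'k', 'l', 'm', 'n', 'o', 'p', 'q'] 'r' (by decide) S.toList]
  simp only [List.cons_append, List.nil_append]
  rw [step_map ['b', 'c', 'd', 'e', 'f', 'g', 'h', 'i', 'j', 'k', 'l', 'm', 'n', 'o', 'p', 'q', 'r'] 's' (by decide) S.toList]
  simp only [List.cons_append, List.nil_append]
  rw [step_map ['b', 'c', 'd', 'e', 'f', 'g', 'h', 'i', 'j', 'k', 'l', 'm', 'n', 'o', 'p', 'q', 'r', 's'] 't' (by decide) S.toList]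
  simp only [List.cons_append, List.nil_append]
  rw [step_map ['b', 'c', 'd', 'e', 'f', 'g', 'h', 'i', 'j', 'k', 'l', 'm', 'n', 'o', 'p', 'q', 'r', 's', 't'] 'u' (by decide) S.toList]
  simp only [List.cons_append, List.nil_append]
  rw [step_map ['b', 'c', 'd', 'e', 'f', 'g', 'h', 'i', 'j', 'k', 'l', 'm', 'n', 'o', 'p', 'q', 'r', 's', 't', 'u'] 'v' (by decide) S.toList]
  simp only [List.cons_append, List.nil_append]
  rw [step_map ['b', 'c', 'd', 'e', 'f', 'g', 'h', 'i', 'j', 'k', 'l', 'm', 'n', 'o', 'p', 'q', 'r', 's', 't', 'u', 'v'] 'w' (by decide) S.toList]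
  simp only [List.cons_append, List.nil_append]
  rw [step_map ['b', 'c', 'd', 'e', 'f', 'g', 'h', 'i', 'j', 'k', 'l', 'm', 'n', 'o', 'p', 'q', 'r', 's', 't', 'u', 'v', 'w'] 'x' (by decide) S.toList]
  simp only [List.cons_append, List.nil_append]
  rw [step_map ['b', 'c', 'd', 'e', 'f', 'g', 'h', 'i', 'j', 'k', 'l', 'm', 'n', 'o', 'p', 'q', 'r', 's', 't', 'u', 'v', 'w', 'x'] 'y' (by decide) S.toList]
  simp only [List.cons_append, List.nil_append]
  rw [step_map ['b', 'c', 'd', 'e', 'f', 'g', 'h', 'i', 'j', 'k', 'l', 'm', 'n', 'o', 'p', 'q', 'r', 's', 't', 'u', 'v', 'w', 'x', 'y'] 'z' (by decide) S.toList]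
  simp only [List.cons_append, List.nil_append]
  rw [last_map S.toList]
  simp only [PySem.Chars.split?, List.isEmpty_cons, Bool.false_eq_true, if_false,
    Option.map_some, Option.getD_some, PySem.Chars.splitOn, List.length_map]
  exact main_lemma S.toList [] 0 (S.toList.length + 1) le_rfl
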